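-- pv_equiv track=rewrite | github.com/abdulmajid18/ds-2023-python | 2025/other/amz/sliding_window/buy_and_sell_stocks_ii.py | maxProfitBruteForce
-- ===== SOURCE A (Python) =====
-- def maxProfitBruteForce(prices):
--     n = len(prices)
--     max_profit = 0
--
--     for i in range(n):  # Buy day
--         for j in range(i + 1, n):  # Sell day
--             if prices[j] > prices[i]:  # Only count profitable transactions
--                 max_profit += prices[j] - prices[i]
--
--     return max_profit
-- ===== SOURCE B (Python) =====
-- def maxProfitBruteForce(prices):
--     n = len(prices)
--     gain = sum(k * q for k, q in enumerate(sorted(prices)))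
--     base = sum((n - 1 - i) * p for i, p in enumerate(prices))
--     return gain - base
-- ===== Notes on version B (the rewrite author's own statement) =====
-- stated objective: faster
-- what changed: Replaces the O(n^2) double loop by the identity sum_{i<j} max(0,p_j-p_i) = sum_k k*sorted(p)[k] - sum_i (n-1-i)*p_i: one sort plus two linear weighted sums.
import Mathlib
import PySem

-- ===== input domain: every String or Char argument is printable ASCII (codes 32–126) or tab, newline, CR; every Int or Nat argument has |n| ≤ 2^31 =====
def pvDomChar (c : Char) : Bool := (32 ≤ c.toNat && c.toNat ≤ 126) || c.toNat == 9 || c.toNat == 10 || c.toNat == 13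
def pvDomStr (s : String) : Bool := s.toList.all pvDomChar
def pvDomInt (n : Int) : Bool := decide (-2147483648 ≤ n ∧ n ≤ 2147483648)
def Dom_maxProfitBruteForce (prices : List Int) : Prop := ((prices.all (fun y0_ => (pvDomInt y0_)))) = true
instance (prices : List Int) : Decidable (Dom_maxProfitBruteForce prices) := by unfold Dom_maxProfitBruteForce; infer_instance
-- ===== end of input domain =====

-- B replaces A's O(n^2) double loop by one sort plus two linear weighted sums,
-- using sum_{i<j} max(0,p_j-p_i) = sum_k k*sorted(p)[k] - sum_i (n-1-i)*p_i (objective: faster).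

-- ===== PORT A =====
def maxProfitBruteForce (prices : List Int) : Int :=
  let n : Int := prices.length
  (PySem.List.pyRange 0 n 1).foldl (fun max_profit i =>
    (PySem.List.pyRange (i + 1) n 1).foldl (fun max_profit j =>
      if PySem.List.pyGetD prices i 0 < PySem.List.pyGetD prices j 0 then
        max_profit + (PySem.List.pyGetD prices j 0 - PySem.List.pyGetD prices i 0)
      else max_profit) max_profit) 0

-- ===== PORT B =====
def maxProfitBruteForce_alt (prices : List Int) : Int :=
  let n : Int := prices.length
  let gain := ((PySem.List.enumerate (PySem.List.sorted prices (fun x => x) false)).map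
      (fun kq => kq.1 * kq.2)).sum
  let base := ((PySem.List.enumerate prices).map (fun ip => (n - 1 - ip.1) * ip.2)).sum
  gain - base

-- ===== PRECONDITION & SPEC =====
def Spec_maxProfitBruteForce (prices : List Int) (out : Int) : Prop := out = maxProfitBruteForce_alt prices
instance (prices : List Int) (out : Int) : Decidable (Spec_maxProfitBruteForce prices out) := by unfold Spec_maxProfitBruteForce; infer_instance

-- ===== CLAIM (what is proved, stated in full; the proofs are below) =====
def Claim_equal_maxProfitBruteForce : Prop := ∀ (prices : List Int), Dom_maxProfitBruteForce prices → Spec_maxProfitBruteForce prices (maxProfitBruteForce prices)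

-- ===== LEMMAS AND PROOFS =====

-- A's value, structurally: for each buy day x, sum of profitable gaps over the later days
def fA : List Int → Int
  | [] => 0
  | x :: xs => (xs.map (fun y => if x < y then y - x else 0)).sum + fA xs

-- sum of max over all unordered pairs
def pairMax : List Int → Int
  | [] => 0
  | x :: xs => (xs.map (fun y => max x y)).sum + pairMax xs

-- sum over i of (n-1-i) * xs[i]
def baseSum : List Int → Int
  | [] => 0
  | x :: xs => (xs.length : Int) * x + baseSum xs

-- inner loop of A as a sum
theorem inner_fold (v : Int) : ∀ (ys : List Int) (m : Int),
    ys.foldl (fun acc y => if v < y then acc + (y - v) else acc) m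
      = m + (ys.map (fun y => if v < y then y - v else 0)).sum := by
  intro ys
  induction ys with
  | nil => simp
  | cons y ys ih =>
      intro m
      simp only [List.foldl_cons, List.map_cons, List.sum_cons, ih]
      split_ifs <;> ring

-- the index-free form of A's double loop
theorem range_sum_eq_fA : ∀ (xs : List Int),
    ((List.range xs.length).map (fun k =>
      ((xs.drop (k + 1)).map (fun y => if xs.getD k 0 < y then y - xs.getD k 0 else 0)).sum)).sum
      = fA xs := by
  intro xs
  induction xs with
  | nil => simp [fA]
  | cons x xs ih =>
      rw [List.length_cons, List.range_succ_eq_map, List.map_cons, List.map_map]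
      simp only [Function.comp_def, List.sum_cons, List.drop_succ_cons, List.getD_cons_succ,
        List.getD_cons_zero, List.drop_zero]
      rw [ih]
      simp [fA]

theorem A_eq_fA (xs : List Int) : maxProfitBruteForce xs = fA xs := by
  simp only [maxProfitBruteForce]
  rw [PySem.List.pyRange_one]
  simp only [Int.sub_zero, Int.toNat_natCast, List.foldl_map]
  have hstep : ∀ (m : Int) (k : Nat),
      (PySem.List.pyRange (0 + (k : Int) + 1) (xs.length : Int) 1).foldl
        (fun acc j => if PySem.List.pyGetD xs (0 + (k : Int)) 0 < PySem.List.pyGetD xs j 0 then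
            acc + (PySem.List.pyGetD xs j 0 - PySem.List.pyGetD xs (0 + (k : Int)) 0) else acc) m
        = m + ((xs.drop (k + 1)).map
            (fun y => if xs.getD k 0 < y then y - xs.getD k 0 else 0)).sum := by
    intro m k
    have h0 : (0 : Int) + (k : Int) + 1 = ((k + 1 : Nat) : Int) := by push_cast; ring
    rw [h0]
    rw [PySem.List.foldl_pyRange_pyGetD' xs 0
      (fun acc y => if PySem.List.pyGetD xs (0 + (k : Int)) 0 < y then
          acc + (y - PySem.List.pyGetD xs (0 + (k : Int)) 0) else acc) m
      (by positivity)]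
    simp only [Int.toNat_natCast]
    have hv : PySem.List.pyGetD xs (0 + (k : Int)) 0 = xs.getD k 0 := by
      simp [PySem.List.pyGetD_natCast]
    rw [hv, inner_fold]
  simp only [hstep]
  rw [PySem.List.foldl_add (List.range xs.length)
    (fun k => ((xs.drop (k + 1)).map (fun y => if xs.getD k 0 < y then y - xs.getD k 0 else 0)).sum) 0]
  rw [range_sum_eq_fA]
  ring

-- pointwise: profitable gap = max x y - x, summed over a list
theorem gap_sum (x : Int) : ∀ (xs : List Int),
    (xs.map (fun y => if x < y then y - x else 0)).sum
      = (xs.map (fun y => max x y)).sum - (xs.length : Int) * x := by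
  intro xs
  induction xs with
  | nil => simp
  | cons y ys ih =>
      simp only [List.map_cons, List.sum_cons, List.length_cons, ih]
      by_cases h : x < y
      · rw [if_pos h, max_eq_right h.le]; push_cast; ring
      · rw [if_neg h, max_eq_left (not_lt.mp h)]; push_cast; ring

theorem fA_eq (xs : List Int) : fA xs = pairMax xs - baseSum xs := by
  induction xs with
  | nil => simp [fA, pairMax, baseSum]
  | cons x xs ih =>
      rw [fA, pairMax, baseSum, ih, gap_sum]
      ring

-- pairMax only depends on the multiset of prices
theorem pairMax_perm : ∀ {xs ys : List Int}, xs.Perm ys → pairMax xs = pairMax ys := by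
  intro xs ys h
  induction h with
  | nil => rfl
  | cons a _ ih => simp only [pairMax, ih]; rw [List.Perm.sum_eq (List.Perm.map _ (by assumption))]
  | swap a b l =>
      simp only [pairMax, List.map_cons, List.sum_cons]
      rw [max_comm]; ring
  | trans _ _ ih1 ih2 => rw [ih1, ih2]

-- on an ascending list, the enumerate-weighted sum computes pairMax (plus a start offset)
theorem enum_gain : ∀ (ys : List Int) (s : Int), ys.Pairwise (· ≤ ·) →
    ((PySem.List.enumerate ys s).map (fun kq => kq.1 * kq.2)).sum = s * ys.sum + pairMax ys := by
  intro ys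
  induction ys with
  | nil => intro s _; simp [pairMax]
  | cons q qs ih =>
      intro s hp
      rw [List.pairwise_cons] at hp
      rw [PySem.List.enumerate_cons, List.map_cons, List.sum_cons, ih (s + 1) hp.2, pairMax]
      have hmax : qs.map (fun y => max q y) = qs.map (fun y => y) := by
        apply List.map_congr_left
        intro y hy
        exact max_eq_right (hp.1 y hy)
      rw [hmax]
      simp only [List.map_id_fun', List.sum_cons, id]
      ring

-- the (n-1-i)-weighted sum over enumerate computes baseSum
theorem enum_base : ∀ (xs : List Int) (s c : Int), c = s + (xs.length : Int) - 1 →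
    ((PySem.List.enumerate xs s).map (fun ip => (c - ip.1) * ip.2)).sum = baseSum xs := by
  intro xs
  induction xs with
  | nil => intro s c _; simp [baseSum]
  | cons x xs ih =>
      intro s c hc
      rw [PySem.List.enumerate_cons, List.map_cons, List.sum_cons,
        ih (s + 1) c (by rw [hc]; simp only [List.length_cons]; push_cast; ring), baseSum]
      have : c - s = (xs.length : Int) := by rw [hc]; simp only [List.length_cons]; push_cast; ring
      rw [this]

theorem alt_eq (xs : List Int) : maxProfitBruteForce_alt xs = pairMax xs - baseSum xs := by
  simp only [maxProfitBruteForce_alt]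
  rw [enum_gain (PySem.List.sorted xs (fun x => x) false) 0
      (by simpa using PySem.List.sorted_pairwise xs (fun x => x)),
    enum_base xs 0 ((xs.length : Int) - 1) (by ring),
    pairMax_perm (PySem.List.sorted_perm xs (fun x => x) false)]
  ring

-- ===== VERDICT (by name: the statement is the Claim_ definition above) =====
theorem maxProfitBruteForce_spec : Claim_equal_maxProfitBruteForce := by
  intro prices _
  unfold Spec_maxProfitBruteForce
  rw [A_eq_fA, alt_eq, fA_eq]
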